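-- pv_equiv track=rewrite | github.com/mc-imperial/spirv-control-flow | fleshing/fleshout.py | recover_bfs_path
-- ===== SOURCE A (Python) =====
-- def recover_bfs_path(src, dst, parents):
--     if src == dst:
--         return [dst]
--
--     path = []
--     while parents[dst] is not None:
--         path.append(dst)
--         dst = parents[dst]
--     path.append(src)
--     return path[::-1]
-- ===== SOURCE B (Python) =====
-- def recover_bfs_path(src, dst, parents):
--     if src == dst:
--         return [dst]
--
--     def recover(node):
--         p = parents[node]
--         if p is None:
--             return [src]
--         return recover(p) + [node]
--
--     return recover(dst)
-- ===== Notes on version B (the rewrite author's own statement) =====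
-- stated objective: simpler
-- what changed: Replaces A's accumulate-then-reverse while loop by a recursion over the parent chain that builds the path directly in forward order, removing the explicit list reversal.
import Mathlib
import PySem

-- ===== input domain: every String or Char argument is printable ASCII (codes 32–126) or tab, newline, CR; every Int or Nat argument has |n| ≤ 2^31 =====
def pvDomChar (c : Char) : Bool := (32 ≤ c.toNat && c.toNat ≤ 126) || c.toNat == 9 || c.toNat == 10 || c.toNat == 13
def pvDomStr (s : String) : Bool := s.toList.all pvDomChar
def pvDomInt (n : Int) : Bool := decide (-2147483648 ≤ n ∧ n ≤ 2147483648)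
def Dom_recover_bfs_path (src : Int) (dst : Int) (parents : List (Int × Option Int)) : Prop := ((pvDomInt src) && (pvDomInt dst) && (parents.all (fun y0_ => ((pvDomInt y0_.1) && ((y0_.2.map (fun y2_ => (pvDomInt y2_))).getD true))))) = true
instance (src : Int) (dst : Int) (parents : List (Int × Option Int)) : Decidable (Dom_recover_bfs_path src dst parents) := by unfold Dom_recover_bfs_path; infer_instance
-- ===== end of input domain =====

-- B replaces A's accumulate-then-reverse while loop by a recursion over the parent
-- chain that builds the path directly in forward order (objective: simpler).


-- ===== PORT A =====
-- A's while loop, transcribed as fuel recursion over the loop STATE (dst, path).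
-- Fuel parents.length + 1 never runs out on inputs satisfying Pre_, where the chain
-- from dst visits pairwise distinct keys of parents before hitting a None.
-- `List.lookup` is Python's dict lookup (first match); a missing key is Python's
-- KeyError, excluded by Pre_ (so the fuel-0 and missing-key outcomes are unreachable there).
def loopA (parents : List (Int × Option Int)) : Nat → Int × List Int → Int × List Int
  | 0, s => s
  | fuel + 1, (d, path) =>
    match parents.lookup d with
    | some (some p) => loopA parents fuel (p, path ++ [d])  -- path.append(dst); dst = parents[dst]
    | _ => (d, path)                                        -- parents[dst] is None: loop exits

def recover_bfs_path (src : Int) (dst : Int) (parents : List (Int × Option Int)) : List Int :=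
  if src == dst then [dst]
  else
    let path := (loopA parents (parents.length + 1) (dst, [])).2
    let path := path ++ [src]                                -- path.append(src)
    (PySem.List.slice? path none none (-1)).getD []          -- path[::-1]

-- ===== PORT B =====
-- Source B's inner `recover`, with the same fuel convention as A's port (both unreachable
-- branches yield the base case [src]; under Pre_ only the real None base case fires):
-- builds the path forward, no accumulator, no reversal.
def recoverB (src : Int) (parents : List (Int × Option Int)) (fuel : Nat) (node : Int) : List Int :=
  if fuel = 0 then [src]
  else
    match parents.lookup node with
    | some (some p) => recoverB src parents (fuel - 1) p ++ [node]
    | _ => [src]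
termination_by fuel
decreasing_by omega

def recover_bfs_path_alt (src : Int) (dst : Int) (parents : List (Int × Option Int)) : List Int :=
  if src == dst then [dst]
  else recoverB src parents (parents.length + 1) dst

-- ===== PRECONDITION & SPEC =====
-- chainOk follows the parent chain from a node with an explicit visited list (cycle
-- detection) and a budget list consumed one entry per step (structural recursion): true exactly when the chain reaches a None entry with every key on the
-- way present and no key repeated.  On a missing key Python A raises KeyError, on a
-- repeated key (a cycle) it loops forever — Pre_ excludes exactly those inputs and
-- nothing else: whenever src ≠ dst, A returns a value iff chainOk parents parents [] dst
-- (the structural budget, one cell per entry of parents, cannot run out: the visited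
-- nodes are pairwise distinct keys of parents, so the walk takes at most |parents| steps).
def chainOk (parents : List (Int × Option Int)) : List (Int × Option Int) → List Int → Int → Bool
  | [], _, _ => false                                  -- budget spent (unreachable from visited = [] with budget = parents)
  | _ :: budget, visited, node =>
    match parents.lookup node with
    | none => false                                    -- missing key: A raises KeyError
    | some none => true                                -- chain ends at a root
    | some (some p) => !visited.contains node && chainOk parents budget (node :: visited) p

def Pre_recover_bfs_path (src : Int) (dst : Int) (parents : List (Int × Option Int)) : Prop :=
  src = dst ∨ chainOk parents parents [] dst = true
instance (src : Int) (dst : Int) (parents : List (Int × Option Int)) : Decidable (Pre_recover_bfs_path src dst parents) := by unfold Pre_recover_bfs_path; infer_instance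

def pvWitness_recover_bfs_path : Int × Int × (List (Int × Option Int)) :=
  (5, 2, [(1, none), (3, some 1), (2, some 3)])

def Spec_recover_bfs_path (src : Int) (dst : Int) (parents : List (Int × Option Int)) (out : List Int) : Prop := out = recover_bfs_path_alt src dst parents
instance (src : Int) (dst : Int) (parents : List (Int × Option Int)) (out : List Int) : Decidable (Spec_recover_bfs_path src dst parents out) := by unfold Spec_recover_bfs_path; infer_instance

-- ===== CLAIM (what is proved, stated in full; the proofs are below) =====
def Claim_equal_recover_bfs_path : Prop := ∀ (src : Int) (dst : Int) (parents : List (Int × Option Int)), Dom_recover_bfs_path src dst parents → Pre_recover_bfs_path src dst parents → Spec_recover_bfs_path src dst parents (recover_bfs_path src dst parents)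

-- ===== LEMMAS AND PROOFS =====

-- The two fuel recursions consume fuel in lockstep, so they agree for EVERY fuel:
-- A's reversed accumulator plus the trailing src is exactly B's forward path.
theorem loopA_eq_recoverB (src : Int) (parents : List (Int × Option Int)) :
    ∀ (fuel : Nat) (dst : Int) (path : List Int),
      ((loopA parents fuel (dst, path)).2 ++ [src]).reverse
        = recoverB src parents fuel dst ++ path.reverse := by
  intro fuel
  induction fuel with
  | zero => intro dst path; simp [loopA, recoverB]
  | succ n ih =>
    intro dst path
    rw [loopA, recoverB]
    cases h : parents.lookup dst with
    | none => simp
    | some v =>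
      cases v with
      | none => simp
      | some p => simpa using ih p (path ++ [dst])

-- ===== VERDICT (by name: the statement is the Claim_ definition above) =====
theorem recover_bfs_path_spec : Claim_equal_recover_bfs_path := by
  intro src dst parents _ _
  unfold Spec_recover_bfs_path recover_bfs_path recover_bfs_path_alt
  by_cases h : src == dst
  · simp [h]
  · simp only [h]
    rw [PySem.List.slice?_none_none_neg_one]
    simpa using loopA_eq_recoverB src parents (parents.length + 1) dst []
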